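-- pv_equiv track=rewrite | github.com/Mattool81974/mission-python-pile | implementation.py | renverser
-- ===== SOURCE A (Python) =====
-- def pile_vide():
--     return []
--
-- def est_vide(p: list):
--     return p == []
--
-- def empiler(p, x):
--     p.append(x)
--
-- def depiler(p: list):
--     assert not est_vide(p), "p est vide"
--     return p.pop()
--
-- def renverser(p: list):
--     pile_bis = pile_vide()
--     while not est_vide(p):
--         d = depiler(p)
--         empiler(pile_bis, d)
--
--     pile_ter = pile_vide()
--     while not est_vide(pile_bis):
--         d = depiler(pile_bis)
--         empiler(pile_ter, d)
--
--     while not est_vide(pile_ter):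
--         empiler(p, depiler(pile_ter))
--
--     return p
-- ===== SOURCE B (Python) =====
-- def renverser(p: list):
--     n = len(p)
--     for i in range(n // 2):
--         p[i], p[n - 1 - i] = p[n - 1 - i], p[i]
--     return p
-- ===== Notes on version B (the rewrite author's own statement) =====
-- stated objective: simpler
-- what changed: Replaces A's three pop/push passes through two auxiliary stacks with a single in-place two-pointer pass that swaps p[i] with p[n-1-i]; no auxiliary storage.
import Mathlib
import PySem

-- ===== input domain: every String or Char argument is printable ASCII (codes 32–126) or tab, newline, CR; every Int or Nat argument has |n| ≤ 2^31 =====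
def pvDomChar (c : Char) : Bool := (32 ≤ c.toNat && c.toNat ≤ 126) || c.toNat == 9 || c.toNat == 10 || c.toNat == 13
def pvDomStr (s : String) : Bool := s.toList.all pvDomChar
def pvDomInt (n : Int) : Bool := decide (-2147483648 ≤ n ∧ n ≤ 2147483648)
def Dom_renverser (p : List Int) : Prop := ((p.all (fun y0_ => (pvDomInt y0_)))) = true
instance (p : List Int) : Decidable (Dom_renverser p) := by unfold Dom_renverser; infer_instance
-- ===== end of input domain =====

-- B replaces A's three stack-to-stack pop/push passes by one in-place two-pointer pass
-- swapping p[i] with p[n-1-i] (objective: simpler). Both Pythons mutate p in place and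
-- return the same object; the equivalence proved here is about the RETURN value.

-- ===== PORT A =====
-- one 'while not est_vide(src): dst.append(src.pop())' loop: move all elements, popping
-- from the end of src and appending to dst
def pvMoveAll : List Int → List Int → List Int
  | src, dst =>
    if h : src = [] then dst
    else pvMoveAll src.dropLast (dst ++ [src.getLast h])
termination_by src _ => src.length
decreasing_by
  have hp : 0 < src.length := List.length_pos_iff.mpr h
  simp [List.length_dropLast]
  omega

def renverser (p : List Int) : List Int :=
  let pile_bis := pvMoveAll p []        -- first while loop: p emptied into pile_bis
  let pile_ter := pvMoveAll pile_bis [] -- second while loop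
  pvMoveAll pile_ter []                 -- third while loop refills the (now empty) p

-- ===== PORT B =====
-- for i in range(n // 2): p[i], p[n-1-i] = p[n-1-i], p[i]  (indices are Nats since both
-- are provably in range 0..n-1; the getD default 0 is never read)
def renverser_alt (p : List Int) : List Int :=
  let n := p.length
  (List.range (n / 2)).foldl
    (fun q i => (q.set i (q.getD (n - 1 - i) 0)).set (n - 1 - i) (q.getD i 0)) p

-- ===== PRECONDITION & SPEC =====
def Spec_renverser (p : List Int) (out : List Int) : Prop := out = renverser_alt p
instance (p : List Int) (out : List Int) : Decidable (Spec_renverser p out) := by unfold Spec_renverser; infer_instance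

-- ===== CLAIM (what is proved, stated in full; the proofs are below) =====
def Claim_equal_renverser : Prop := ∀ (p : List Int), Dom_renverser p → Spec_renverser p (renverser p)

-- ===== LEMMAS AND PROOFS =====
theorem pvMoveAll_eq (src dst : List Int) : pvMoveAll src dst = dst ++ src.reverse := by
  induction src using List.reverseRecOn generalizing dst with
  | nil => unfold pvMoveAll; simp
  | append_singleton l a ih =>
      unfold pvMoveAll
      simp [ih]

theorem pv_getD_set (l : List Int) (i j : Nat) (a : Int) (hi : i < l.length) :
    (l.set i a).getD j 0 = if i = j then a else l.getD j 0 := by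
  simp [List.getD, List.getElem?_set]
  split_ifs with h
  · subst h; simp
  · rfl

-- invariant of B's swap loop: after k swaps the first k and last k slots hold the
-- reversed values, the middle is untouched
theorem pv_swap_invariant (p : List Int) (k : Nat) (hk : k ≤ p.length / 2) :
    ((List.range k).foldl
        (fun q i => (q.set i (q.getD (p.length - 1 - i) 0)).set (p.length - 1 - i) (q.getD i 0)) p).length
      = p.length ∧
    ∀ j, ((List.range k).foldl
        (fun q i => (q.set i (q.getD (p.length - 1 - i) 0)).set (p.length - 1 - i) (q.getD i 0)) p).getD j 0
      = if j < k ∨ (p.length - k ≤ j ∧ j < p.length) then p.getD (p.length - 1 - j) 0 else p.getD j 0 := by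
  induction k with
  | zero => simp
  | succ k ih =>
      have hk' : k ≤ p.length / 2 := Nat.le_of_succ_le hk
      obtain ⟨hlen, hget⟩ := ih hk'
      rw [List.range_succ, List.foldl_append]
      set q := (List.range k).foldl
        (fun q i => (q.set i (q.getD (p.length - 1 - i) 0)).set (p.length - 1 - i) (q.getD i 0)) p with hq
      have hn : 2 * (k + 1) ≤ p.length := by omega
      have hk1 : k < q.length := by omega
      have hk2 : p.length - 1 - k < (q.set k (q.getD (p.length - 1 - k) 0)).length := by
        simp; omega
      constructor
      · simp [hlen]
      · intro j
        simp only [List.foldl_cons, List.foldl_nil]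
        rw [pv_getD_set _ _ _ _ hk2, pv_getD_set _ _ _ _ hk1]
        rw [hget j, hget k, hget (p.length - 1 - k)]
        have h1 : ¬ (k < k ∨ (p.length - k ≤ k ∧ k < p.length)) := by omega
        have h2 : ¬ (p.length - 1 - k < k ∨ (p.length - k ≤ p.length - 1 - k ∧ p.length - 1 - k < p.length)) := by
          omega
        rw [if_neg h1, if_neg h2]
        split_ifs <;> first
          | rfl
          | (congr 1; omega)

theorem pv_getD_reverse (p : List Int) (j : Nat) (hj : j < p.length) :
    p.reverse.getD j 0 = p.getD (p.length - 1 - j) 0 := by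
  have hj' : j < p.reverse.length := by simpa using hj
  have hj'' : p.length - 1 - j < p.length := by omega
  rw [List.getD_eq_getElem _ _ hj', List.getD_eq_getElem _ _ hj'']
  simp

theorem renverser_alt_eq_reverse (p : List Int) : renverser_alt p = p.reverse := by
  obtain ⟨hlen, hget⟩ := pv_swap_invariant p (p.length / 2) (le_refl _)
  have halt : renverser_alt p = (List.range (p.length / 2)).foldl
      (fun q i => (q.set i (q.getD (p.length - 1 - i) 0)).set (p.length - 1 - i) (q.getD i 0)) p := rfl
  rw [halt]
  apply List.ext_getElem (by simpa using hlen)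
  intro j h1 h2
  have hj : j < p.length := by rw [hlen] at h1; exact h1
  have hq := hget j
  rw [List.getD_eq_getElem _ _ h1] at hq
  have hrev := pv_getD_reverse p j hj
  rw [List.getD_eq_getElem _ _ h2] at hrev
  rw [hq]
  split_ifs with h
  · exact hrev.symm
  · -- j is the middle index of an odd-length list: p.length - 1 - j = j
    have hm : p.length - 1 - j = j := by omega
    rw [hm] at hrev
    exact hrev.symm

-- ===== VERDICT (by name: the statement is the Claim_ definition above) =====
theorem renverser_spec : Claim_equal_renverser := by
  intro p _
  unfold Spec_renverser renverser
  rw [renverser_alt_eq_reverse, pvMoveAll_eq, pvMoveAll_eq, pvMoveAll_eq]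
  simp
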